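-- pv_equiv track=rewrite | github.com/paiml/depyler | examples/hard_geometric_seq.py | geo_generate
-- ===== SOURCE A (Python) =====
-- def geo_generate(first: int, ratio: int, count: int) -> list[int]:
--     """Generate first 'count' terms of geometric sequence."""
--     result: list[int] = []
--     current: int = first
--     idx: int = 0
--     while idx < count:
--         result.append(current)
--         current = current * ratio
--         idx = idx + 1
--     return result
-- ===== SOURCE B (Python) =====
-- def geo_generate(first: int, ratio: int, count: int) -> list[int]:
--     """Generate first 'count' terms of geometric sequence."""
--     return [first * ratio**i for i in range(count)]
-- ===== Notes on version B (the rewrite author's own statement) =====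
-- stated objective: idiomatic
-- what changed: Replaces the while-loop threading a running product through an accumulator list with a closed-form comprehension computing each term directly as first*ratio**i over range(count).
import Mathlib
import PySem

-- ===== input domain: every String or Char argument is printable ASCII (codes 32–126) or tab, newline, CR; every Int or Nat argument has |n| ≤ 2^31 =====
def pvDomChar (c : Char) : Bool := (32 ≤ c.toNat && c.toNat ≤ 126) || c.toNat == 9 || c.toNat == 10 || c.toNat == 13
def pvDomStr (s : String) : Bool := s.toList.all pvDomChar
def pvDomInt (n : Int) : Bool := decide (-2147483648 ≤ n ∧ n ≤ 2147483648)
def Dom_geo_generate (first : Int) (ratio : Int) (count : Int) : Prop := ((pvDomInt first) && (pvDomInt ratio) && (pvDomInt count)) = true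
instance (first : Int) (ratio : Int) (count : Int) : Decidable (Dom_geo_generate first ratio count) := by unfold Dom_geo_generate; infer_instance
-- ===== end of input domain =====

-- B replaces A's while loop with a running-product accumulator by a closed-form
-- comprehension first*ratio**i over range(count) (idiomatic; same cost).

-- ===== PORT A =====
-- while idx < count: result.append(current); current *= ratio; idx += 1
def geoA_loop (ratio count : Int) (current idx : Int) (result : List Int) : List Int :=
  if idx < count then
    geoA_loop ratio count (current * ratio) (idx + 1) (result ++ [current])
  else result
termination_by (count - idx).toNat
decreasing_by omega

def geo_generate (first : Int) (ratio : Int) (count : Int) : List Int :=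
  geoA_loop ratio count first 0 []

-- ===== PORT B =====
-- [first * ratio**i for i in range(count)]
def geo_generate_alt (first : Int) (ratio : Int) (count : Int) : List Int :=
  (PySem.List.pyRange 0 count 1).map (fun i => first * ratio ^ i.toNat)

-- ===== PRECONDITION & SPEC =====
def Spec_geo_generate (first : Int) (ratio : Int) (count : Int) (out : List Int) : Prop := out = geo_generate_alt first ratio count
instance (first : Int) (ratio : Int) (count : Int) (out : List Int) : Decidable (Spec_geo_generate first ratio count out) := by unfold Spec_geo_generate; infer_instance

-- ===== CLAIM (what is proved, stated in full; the proofs are below) =====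
def Claim_equal_geo_generate : Prop := ∀ (first : Int) (ratio : Int) (count : Int), Dom_geo_generate first ratio count → Spec_geo_generate first ratio count (geo_generate first ratio count)

-- ===== LEMMAS AND PROOFS =====
theorem geoA_loop_eq (ratio count : Int) :
    ∀ (n : Nat) (idx current : Int) (result : List Int), (count - idx).toNat = n →
    geoA_loop ratio count current idx result
      = result ++ (List.range n).map (fun j => current * ratio ^ j) := by
  intro n
  induction n with
  | zero =>
    intro idx current result h
    rw [geoA_loop]
    have : ¬ idx < count := by omega
    simp [this]
  | succ m ih =>
    intro idx current result h
    rw [geoA_loop]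
    have hlt : idx < count := by omega
    rw [if_pos hlt, ih (idx + 1) (current * ratio) (result ++ [current]) (by omega)]
    rw [List.range_succ_eq_map]
    simp [List.map_map, Function.comp, pow_succ, mul_comm, mul_assoc, mul_left_comm]

-- ===== VERDICT (by name: the statement is the Claim_ definition above) =====
theorem geo_generate_spec : Claim_equal_geo_generate := by
  intro first ratio count _
  unfold Spec_geo_generate geo_generate geo_generate_alt
  rw [geoA_loop_eq ratio count (count - 0).toNat 0 first [] rfl,
      PySem.List.pyRange_one]
  simp
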